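-- pv_equiv track=rewrite | github.com/brandonharris177/edabit-challanges | index.py | alternatingSums
-- ===== SOURCE A (Python) =====
-- def alternatingSums(a):
--     team1 = 0
--     team2 = 0
--     for num in range(0, len(a)):
--         if num == 0 or num%2 == 0:
--             team1 = team1 + a[num]
--         elif num%2 == 1:
--             team2 = team2 + a[num]
--
--     return[team1, team2]
-- ===== SOURCE B (Python) =====
-- def alternatingSums(a):
--     return [sum(a[::2]), sum(a[1::2])]
-- ===== Notes on version B (the rewrite author's own statement) =====
-- stated objective: simpler
-- what changed: Replaces the indexed loop with a per-index parity branch by two strided slices (a[::2], a[1::2]) summed with the builtin sum.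
import Mathlib
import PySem

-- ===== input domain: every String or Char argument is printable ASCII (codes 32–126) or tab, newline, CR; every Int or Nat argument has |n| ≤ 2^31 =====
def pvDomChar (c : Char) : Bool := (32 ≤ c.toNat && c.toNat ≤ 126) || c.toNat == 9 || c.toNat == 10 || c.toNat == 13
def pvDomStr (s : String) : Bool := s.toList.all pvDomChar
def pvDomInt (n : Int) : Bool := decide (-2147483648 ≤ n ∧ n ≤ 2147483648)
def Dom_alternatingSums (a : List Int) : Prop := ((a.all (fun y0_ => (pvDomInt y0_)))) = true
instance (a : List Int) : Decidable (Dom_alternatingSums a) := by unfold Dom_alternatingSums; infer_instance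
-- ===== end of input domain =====

-- B replaces A's indexed loop with a parity branch by two strided slices summed separately (simpler decomposition).

-- ===== PORT A =====
-- one indexed loop over range(len(a)), branching on index parity
def alternatingSums (a : List Int) : List Int :=
  let st := (PySem.List.pyRange 0 (PySem.List.len a)).foldl
    (fun (p : Int × Int) num =>
      if num == 0 || num % 2 == 0 then (p.1 + PySem.List.pyGetD a num 0, p.2)
      else if num % 2 == 1 then (p.1, p.2 + PySem.List.pyGetD a num 0)
      else p)
    ((0 : Int), (0 : Int))
  [st.1, st.2]

-- ===== PORT B =====
-- everyOther takes a[::2]; a[1::2] is everyOther of the tail (the step-2 slices of Source B)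
def everyOther : List Int → List Int
  | [] => []
  | [x] => [x]
  | x :: _ :: xs => x :: everyOther xs

def alternatingSums_alt (a : List Int) : List Int :=
  [(everyOther a).sum, (everyOther a.tail).sum]

-- ===== PRECONDITION & SPEC =====
def Spec_alternatingSums (a : List Int) (out : List Int) : Prop := out = alternatingSums_alt a
instance (a : List Int) (out : List Int) : Decidable (Spec_alternatingSums a out) := by unfold Spec_alternatingSums; infer_instance

-- ===== CLAIM (what is proved, stated in full; the proofs are below) =====
def Claim_equal_alternatingSums : Prop := ∀ (a : List Int), Dom_alternatingSums a → Spec_alternatingSums a (alternatingSums a)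

-- ===== LEMMAS AND PROOFS =====

theorem everyOther_cons (x : Int) (r : List Int) :
    everyOther (x :: r) = x :: everyOther r.tail := by
  cases r <;> simp [everyOther]

-- invariant of A's loop: starting at index k with accumulators (t1, t2), folding the
-- remaining indices adds the even-position/odd-position sums of the suffix a.drop k
theorem loop_main (a : List Int) : ∀ (xs : List Int) (k : Nat) (t1 t2 : Int),
    a.drop k = xs →
    (PySem.List.pyRange (k : Int) (PySem.List.len a)).foldl
      (fun (p : Int × Int) num =>
        if num == 0 || num % 2 == 0 then (p.1 + PySem.List.pyGetD a num 0, p.2)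
        else if num % 2 == 1 then (p.1, p.2 + PySem.List.pyGetD a num 0)
        else p) (t1, t2)
    = if k % 2 = 0 then (t1 + (everyOther xs).sum, t2 + (everyOther xs.tail).sum)
      else (t1 + (everyOther xs.tail).sum, t2 + (everyOther xs).sum) := by
  intro xs
  induction xs with
  | nil =>
    intro k t1 t2 hdrop
    have hlen : a.length ≤ k := by
      have := congrArg List.length hdrop
      simp at this; omega
    have : PySem.List.pyRange (k : Int) (PySem.List.len a) = [] := by
      rw [PySem.List.pyRange_one]
      have : ((PySem.List.len a) - (k : Int)).toNat = 0 := by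
        simp [PySem.List.len]; omega
      rw [this]; simp
    rw [this]
    simp [everyOther]
  | cons x r ih =>
    intro k t1 t2 hdrop
    have hk : (k : Int) < PySem.List.len a := by
      have := congrArg List.length hdrop
      simp at this
      simp [PySem.List.len]; omega
    rw [PySem.List.pyRange_one_cons hk]
    have hget : PySem.List.pyGetD a (k : Int) 0 = x := by
      rw [PySem.List.pyGetD_natCast]
      have h0 : a[k]? = some x := by
        have : (a.drop k)[0]? = some x := by rw [hdrop]; rfl
        simpa using this
      simp [List.getD, h0]
    have hdrop' : a.drop (k + 1) = r := by
      have : (a.drop k).tail = a.drop (k + 1) := by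
        rw [List.tail_drop]
      rw [← this, hdrop]; rfl
    have ihk := ih (k + 1) 
    rcases Nat.even_or_odd k with he | ho
    · -- k even: x goes to team1
      have hk0 : k % 2 = 0 := Nat.even_iff.mp he
      have h2 : (k : Int) % 2 = 0 := by omega
      have hcond : (((k : Int) == 0 || (k : Int) % 2 == 0)) = true := by
        simp [h2]
      simp only [List.foldl_cons, hcond, reduceIte, hget]
      have := ihk (t1 + x) t2 hdrop'
      push_cast at this
      rw [this]
      have hk1 : (k + 1) % 2 ≠ 0 := by omega
      simp only [if_neg hk1, if_pos hk0, everyOther_cons, List.tail_cons, List.sum_cons]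
      exact Prod.ext (by ring) rfl
    · -- k odd: x goes to team2
      have hk0 : k % 2 = 1 := Nat.odd_iff.mp ho
      have h2 : (k : Int) % 2 = 1 := by omega
      have hne0 : ((k : Int) == 0) = false := by simp; omega
      have hne : ((k : Int) % 2 == 0) = false := by simp [h2]
      have hyes : ((k : Int) % 2 == 1) = true := by simp [h2]
      simp only [List.foldl_cons, hne0, hne, hyes, Bool.false_or, Bool.false_eq_true, if_false, reduceIte, hget]
      have := ihk t1 (t2 + x) hdrop'
      push_cast at this
      rw [this]
      have hk1 : (k + 1) % 2 = 0 := by omega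
      have hk0' : k % 2 ≠ 0 := by omega
      simp only [if_pos hk1, if_neg hk0', everyOther_cons, List.tail_cons, List.sum_cons]
      exact Prod.ext rfl (by ring)

-- ===== VERDICT (by name: the statement is the Claim_ definition above) =====
theorem alternatingSums_spec : Claim_equal_alternatingSums := by
  intro a _
  unfold Spec_alternatingSums alternatingSums alternatingSums_alt
  have h := loop_main a a 0 0 0 (by simp)
  simp only [Nat.cast_zero] at h
  simp only [h]
  simp
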